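-- pv_equiv track=rewrite | github.com/vZyx/Python-notes | 26_recursion/homework/09/02.py | get_path_sum
-- ===== SOURCE A (Python) =====
-- def is_within_grid(r, c, rows, cols):
--     return 0 <= r < rows and 0 <= c < cols
--
-- def get_neibghours(i, j, rows, cols):
--     dir = [(1, 0), (0, 1), (1, 1)]
--     return [(r, c) for di, dj in dir
--             if is_within_grid(r := i + di, c:= j + dj, rows, cols)]
--
-- def argmax(lst):
--     return lst.index(max(lst))
--
-- def get_path_sum(matrix, r = 0, c = 0): # from the old homework
--     total_sum = matrix[r][c]
--     rows, cols = len(matrix), len(matrix[0])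
--
--     if not (positions := get_neibghours(r, c, rows, cols)):
--         return total_sum
--
--     values = [matrix[i][j] for i, j in positions]
--     r, c = positions[argmax(values)]
--
--     total_sum += get_path_sum(matrix, r, c)
--
--     return total_sum
-- ===== SOURCE B (Python) =====
-- def get_path_sum(matrix, r=0, c=0):
--     rows, cols = len(matrix), len(matrix[0])
--     total = matrix[r][c]
--     while True:
--         cand = [(r + dr, c + dc) for dr, dc in ((1, 0), (0, 1), (1, 1))
--                 if 0 <= r + dr < rows and 0 <= c + dc < cols]
--         if not cand:
--             return total
--         r, c = max(cand, key=lambda p: matrix[p[0]][p[1]])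
--         total += matrix[r][c]
-- ===== Notes on version B (the rewrite author's own statement) =====
-- stated objective: simpler
-- what changed: The recursive descent with helper functions, a separate values list and index(max) argmax is replaced by one iterative while-loop with a running total that picks the next cell via max(cand, key=...).
-- outside the precondition, e.g. on get_path_sum([[1], [2, 3]], 0, 0): A returns 3, B returns 3
import Mathlib
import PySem

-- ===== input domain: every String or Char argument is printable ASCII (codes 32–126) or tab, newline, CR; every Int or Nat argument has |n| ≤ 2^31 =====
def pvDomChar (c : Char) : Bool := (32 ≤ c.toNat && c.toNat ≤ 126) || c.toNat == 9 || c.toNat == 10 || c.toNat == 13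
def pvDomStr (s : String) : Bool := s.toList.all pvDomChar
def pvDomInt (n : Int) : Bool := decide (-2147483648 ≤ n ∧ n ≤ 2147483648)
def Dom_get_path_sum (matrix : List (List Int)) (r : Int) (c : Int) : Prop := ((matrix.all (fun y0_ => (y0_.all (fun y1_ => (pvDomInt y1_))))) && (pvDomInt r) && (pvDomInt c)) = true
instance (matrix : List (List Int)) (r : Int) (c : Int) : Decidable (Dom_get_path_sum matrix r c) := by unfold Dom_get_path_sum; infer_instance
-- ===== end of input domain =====

-- B replaces A's recursion + values list + index(max) argmax by one iterative loop picking max(cand, key=...); objective: simpler.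
-- ===== PORT A =====
def pvInGridA (r c rows cols : Int) : Bool :=
  decide (0 ≤ r) && decide (r < rows) && decide (0 ≤ c) && decide (c < cols)

def pvNeighboursA (i j rows cols : Int) : List (Int × Int) :=
  [((1:Int),(0:Int)), (0,1), (1,1)].foldl
    (fun acc d => if pvInGridA (i + d.1) (j + d.2) rows cols then acc ++ [(i + d.1, j + d.2)] else acc) []

-- matrix[i][j]; default only hit outside Pre_
def pvAtA (matrix : List (List Int)) (i j : Int) : Int :=
  PySem.List.pyGetD (PySem.List.pyGetD matrix i []) j 0

-- lst.index(max(lst)); the none branch is Python's ValueError on empty lst, unreachable under Pre_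
def pvArgmaxA (lst : List Int) : Nat :=
  match PySem.List.max? lst (fun v => v) with
  | none => 0
  | some m => (PySem.List.index? lst m).getD 0

-- membership bounds for the candidate positions (needed by the ports' termination proofs)
theorem mem_pvNeighboursA {p : Int × Int} {i j rows cols : Int}
    (h : p ∈ pvNeighboursA i j rows cols) :
    0 ≤ p.1 ∧ p.1 < rows ∧ 0 ≤ p.2 ∧ p.2 < cols ∧ i + j + 1 ≤ p.1 + p.2 := by
  unfold pvNeighboursA at h
  rw [PySem.List.foldl_append_if] at h
  simp only [List.nil_append, List.mem_map, List.mem_filter] at h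
  obtain ⟨d, ⟨hd, hin⟩, rfl⟩ := h
  simp only [pvInGridA, Bool.and_eq_true, decide_eq_true_eq] at hin
  fin_cases hd <;> simp_all <;> omega

-- decrease of A's measure (kept as a named lemma so the recursion's proof term stays small)
theorem pvDecA {matrix : List (List Int)} {r c : Int} {p : Int × Int}
    (hm0 : p ∈ pvNeighboursA r c (matrix.length : Int) ((PySem.List.pyGetD matrix 0 []).length : Int)) :
    ((matrix.length : Int) + ((PySem.List.pyGetD matrix 0 []).length : Int) - p.1 - p.2).toNat
      < ((matrix.length : Int) + ((PySem.List.pyGetD matrix 0 []).length : Int) - r - c).toNat := by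
  have hm := mem_pvNeighboursA hm0
  omega

def get_path_sum (matrix : List (List Int)) (r : Int) (c : Int) : Int :=
  let total_sum := pvAtA matrix r c
  let rows : Int := matrix.length
  let cols : Int := (PySem.List.pyGetD matrix 0 []).length
  let positions := pvNeighboursA r c rows cols
  if positions = [] then total_sum
  else
    let values := positions.map (fun q => pvAtA matrix q.1 q.2)
    match h : PySem.List.pyGet? positions ((pvArgmaxA values : Nat) : Int) with
    | none => total_sum   -- IndexError: unreachable, argmax index is in range
    | some p => total_sum + get_path_sum matrix p.1 p.2
termination_by ((matrix.length : Int) + ((PySem.List.pyGetD matrix 0 []).length : Int) - r - c).toNat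
decreasing_by
  exact pvDecA (PySem.List.mem_of_pyGet?_eq_some _ h)

-- ===== PORT B =====
def pvInsideB (r c rows cols : Int) : Bool :=
  decide (0 ≤ r) && decide (r < rows) && decide (0 ≤ c) && decide (c < cols)

def pvValB (matrix : List (List Int)) (i j : Int) : Int :=
  PySem.List.pyGetD (PySem.List.pyGetD matrix i []) j 0

def pvCandB (r c rows cols : Int) : List (Int × Int) :=
  ([((1:Int),(0:Int)), (0,1), (1,1)].filter
      (fun d => pvInsideB (r + d.1) (c + d.2) rows cols)).map
    (fun d => (r + d.1, c + d.2))

theorem mem_pvCandB {p : Int × Int} {i j rows cols : Int}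
    (h : p ∈ pvCandB i j rows cols) :
    0 ≤ p.1 ∧ p.1 < rows ∧ 0 ≤ p.2 ∧ p.2 < cols ∧ i + j + 1 ≤ p.1 + p.2 := by
  unfold pvCandB at h
  simp only [List.mem_map, List.mem_filter] at h
  obtain ⟨d, ⟨hd, hin⟩, rfl⟩ := h
  simp only [pvInsideB, Bool.and_eq_true, decide_eq_true_eq] at hin
  fin_cases hd <;> simp_all <;> omega

-- decrease of B's measure (named lemma keeps the recursion's proof term small)
theorem pvDecB {rows cols i j : Int} {p : Int × Int}
    (hm0 : p ∈ pvCandB i j rows cols) :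
    (rows + cols - p.1 - p.2).toNat < (rows + cols - i - j).toNat := by
  have hm := mem_pvCandB hm0
  omega

-- the while-loop of B: total accumulates, (r, c) walks to the max-valued neighbour
def pvLoopB (matrix : List (List Int)) (rows cols total r c : Int) : Int :=
  match h : PySem.List.max? (pvCandB r c rows cols) (fun q => pvValB matrix q.1 q.2) with
  | none => total
  | some p => pvLoopB matrix rows cols (total + pvValB matrix p.1 p.2) p.1 p.2
termination_by (rows + cols - r - c).toNat
decreasing_by
  exact pvDecB (PySem.List.max?_mem h)

def get_path_sum_alt (matrix : List (List Int)) (r : Int) (c : Int) : Int :=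
  let rows : Int := matrix.length
  let cols : Int := (PySem.List.pyGetD matrix 0 []).length
  pvLoopB matrix rows cols (pvValB matrix r c) r c

-- ===== PRECONDITION & SPEC =====
-- Pre_ excludes empty or ragged matrices and out-of-range start indices, on which A's chained
-- row/cell accesses can raise IndexError (on a few ragged matrices A's greedy path happens to
-- avoid the short row and A still returns; whether it does depends on the walked path, which a
-- closed-form condition cannot state, so ragged matrices are excluded wholesale).
def Pre_get_path_sum (matrix : List (List Int)) (r : Int) (c : Int) : Prop :=
  matrix ≠ [] ∧
  (∀ row ∈ matrix, row.length = (PySem.List.pyGetD matrix 0 []).length) ∧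
  -(matrix.length : Int) ≤ r ∧ r < matrix.length ∧
  -((PySem.List.pyGetD matrix 0 []).length : Int) ≤ c ∧ c < (PySem.List.pyGetD matrix 0 []).length
instance (matrix : List (List Int)) (r : Int) (c : Int) : Decidable (Pre_get_path_sum matrix r c) := by
  unfold Pre_get_path_sum; infer_instance

def pvWitness_get_path_sum : List (List Int) × Int × Int := ([[1, 2], [3, 4]], 0, 0)

def Spec_get_path_sum (matrix : List (List Int)) (r : Int) (c : Int) (out : Int) : Prop := out = get_path_sum_alt matrix r c
instance (matrix : List (List Int)) (r : Int) (c : Int) (out : Int) : Decidable (Spec_get_path_sum matrix r c out) := by unfold Spec_get_path_sum; infer_instance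

-- ===== CLAIM (what is proved, stated in full; the proofs are below) =====
def Claim_equal_get_path_sum : Prop := ∀ (matrix : List (List Int)) (r : Int) (c : Int), Dom_get_path_sum matrix r c → Pre_get_path_sum matrix r c → Spec_get_path_sum matrix r c (get_path_sum matrix r c)

-- ===== LEMMAS AND PROOFS =====

theorem pvValB_eq_pvAtA : pvValB = pvAtA := rfl

theorem pvCandB_eq_pvNeighboursA (i j rows cols : Int) :
    pvCandB i j rows cols = pvNeighboursA i j rows cols := by
  unfold pvCandB pvNeighboursA
  rw [PySem.List.foldl_append_if]
  rfl

-- max? over a cons is the running first-max fold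
theorem foldl_some_max {α : Type} (f : α → Int) :
    ∀ (t : List α) (x : α),
      t.foldl (fun acc y => match acc with
        | none => some y
        | some m => if f m < f y then some y else some m) (some x)
        = some (t.foldl (fun m y => if f m < f y then y else m) x) := by
  intro t
  induction t with
  | nil => intro x; rfl
  | cons y t ih =>
    intro x
    simp only [List.foldl_cons]
    by_cases h : f x < f y <;> simp [h, ih]

theorem max?_cons_fold {α : Type} (f : α → Int) (x : α) (t : List α) :
    PySem.List.max? (x :: t) f = some (t.foldl (fun m y => if f m < f y then y else m) x) := by
  unfold PySem.List.max?
  simp only [List.foldl_cons]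
  exact foldl_some_max f t x

-- the fold only moves up under f
theorem fold_le {α : Type} (f : α → Int) :
    ∀ (t : List α) (x : α),
      f x ≤ f (t.foldl (fun m y => if f m < f y then y else m) x) := by
  intro t
  induction t with
  | nil => intro x; simp
  | cons y t ih =>
    intro x
    simp only [List.foldl_cons]
    by_cases h : f x < f y
    · simp only [if_pos h]; exact le_of_lt (lt_of_lt_of_le h (ih y))
    · simp only [if_neg h]; exact ih x

-- the fold either stays at its init or strictly improves
theorem fold_eq_or {α : Type} (f : α → Int) :
    ∀ (t : List α) (x : α),
      t.foldl (fun m y => if f m < f y then y else m) x = x ∨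
      f x < f (t.foldl (fun m y => if f m < f y then y else m) x) := by
  intro t
  induction t with
  | nil => intro x; exact Or.inl rfl
  | cons y t ih =>
    intro x
    simp only [List.foldl_cons]
    by_cases h : f x < f y
    · simp only [if_pos h]
      exact Or.inr (lt_of_lt_of_le h (fold_le f t y))
    · simp only [if_neg h]; exact ih x

-- max over mapped values is f of the first-max element
theorem fold_map_id {α : Type} (f : α → Int) :
    ∀ (t : List α) (x : α),
      (t.map f).foldl (fun m v => if m < v then v else m) (f x)
        = f (t.foldl (fun m y => if f m < f y then y else m) x) := by
  intro t
  induction t with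
  | nil => intro x; rfl
  | cons y t ih =>
    intro x
    simp only [List.map_cons, List.foldl_cons]
    by_cases h : f x < f y <;> simp [h, ih]

theorem max?_map_id {α : Type} (f : α → Int) (l : List α) :
    PySem.List.max? (l.map f) (fun v => v) = (PySem.List.max? l f).map f := by
  cases l with
  | nil => rfl
  | cons x t =>
    rw [List.map_cons, max?_cons_fold (fun v => v), max?_cons_fold f]
    simp only [Option.map_some]
    exact congrArg some (fold_map_id f t x)

-- index of the first maximal value selects the first-max element
theorem index_sel_aux {α : Type} (f : α → Int) :
    ∀ (t : List α) (x m : α),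
      t.foldl (fun m y => if f m < f y then y else m) x = m →
      ∃ k : Nat, PySem.List.index? ((x :: t).map f) (f m) = some k ∧
        PySem.List.pyGet? (x :: t) (k : Int) = some m := by
  intro t
  induction t with
  | nil =>
    intro x m hm
    simp only [List.foldl_nil] at hm
    subst hm
    exact ⟨0, by simp, by simp⟩
  | cons y t ih =>
    intro x m hm
    simp only [List.foldl_cons] at hm
    by_cases hxy : f x < f y
    · simp only [if_pos hxy] at hm
      obtain ⟨k, hi, hg⟩ := ih y m hm
      have hxm : f x < f m := lt_of_lt_of_le hxy (hm ▸ fold_le f t y)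
      refine ⟨k + 1, ?_, ?_⟩
      · rw [List.map_cons, PySem.List.index?_cons_of_ne _ (ne_of_lt hxm), hi]
        rfl
      · have : ((k + 1 : Nat) : Int) = ((k : Nat) : Int) + 1 := by push_cast; ring
        rw [this, PySem.List.pyGet?_cons_succ]
        exact hg
    · simp only [if_neg hxy] at hm
      obtain ⟨k, hi, hg⟩ := ih x m hm
      have hym : f y ≤ f x := le_of_not_gt hxy
      have hxle : f x ≤ f m := hm ▸ fold_le f t x
      by_cases hxm : f x = f m
      · have hmx : m = x := by
          rcases fold_eq_or f t x with he | hlt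
          · rw [hm] at he; exact he
          · rw [hm] at hlt; exact absurd hxm (ne_of_lt hlt)
        subst hmx
        refine ⟨0, ?_, ?_⟩
        · rw [List.map_cons]; exact PySem.List.index?_cons_self _ _
        · simp
      · have hxm' : f x < f m := lt_of_le_of_ne hxle hxm
        have hym' : f y ≠ f m := ne_of_lt (lt_of_le_of_lt hym hxm')
        rw [List.map_cons, PySem.List.index?_cons_of_ne _ (ne_of_lt hxm')] at hi
        obtain ⟨j, hj, hk⟩ : ∃ j, PySem.List.index? (t.map f) (f m) = some j ∧ k = j + 1 := by
          cases hmap : PySem.List.index? (t.map f) (f m) with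
          | none => rw [hmap] at hi; simp at hi
          | some j => rw [hmap] at hi; simp at hi; exact ⟨j, rfl, hi.symm⟩
        subst hk
        refine ⟨j + 2, ?_, ?_⟩
        · rw [List.map_cons, PySem.List.index?_cons_of_ne _ (ne_of_lt hxm'),
            List.map_cons, PySem.List.index?_cons_of_ne _ hym', hj]
          rfl
        · have h2 : ((j + 2 : Nat) : Int) = ((j + 1 : Nat) : Int) + 1 := by push_cast; ring
          rw [h2, PySem.List.pyGet?_cons_succ]
          have h1 : ((j + 1 : Nat) : Int) = ((j : Nat) : Int) + 1 := by push_cast; ring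
          rw [h1] at hg ⊢
          rw [PySem.List.pyGet?_cons_succ] at hg ⊢
          exact hg

-- A's positions[argmax(values)] is exactly B's max(cand, key=value)
theorem select_eq (g : Int × Int → Int) (l : List (Int × Int)) (p : Int × Int)
    (h : PySem.List.max? l g = some p) :
    PySem.List.pyGet? l ((pvArgmaxA (l.map g) : Nat) : Int) = some p := by
  cases l with
  | nil => simp [PySem.List.max?] at h
  | cons x t =>
    have h0 := h
    rw [max?_cons_fold g] at h0
    obtain ⟨k, hi, hg⟩ := index_sel_aux g t x p (Option.some.inj h0)
    have hmax : PySem.List.max? ((x :: t).map g) (fun v => v) = some (g p) := by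
      rw [max?_map_id, h]; rfl
    unfold pvArgmaxA
    rw [hmax]
    simp only [hi, Option.getD_some]
    exact hg

theorem loop_eq (matrix : List (List Int)) :
    ∀ (n : Nat) (total r c : Int),
      ((matrix.length : Int) + ((PySem.List.pyGetD matrix 0 []).length : Int) - r - c).toNat ≤ n →
      pvLoopB matrix (matrix.length : Int) ((PySem.List.pyGetD matrix 0 []).length : Int) total r c
        = total - pvAtA matrix r c + get_path_sum matrix r c := by
  intro n
  induction n with
  | zero =>
    intro total r c hb
    rw [pvLoopB]
    split
    case _ h =>
      have hpos : pvNeighboursA r c (matrix.length : Int) ((PySem.List.pyGetD matrix 0 []).length : Int) = [] := by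
        rw [← pvCandB_eq_pvNeighboursA]
        exact (PySem.List.max?_eq_none_iff _ _).mp h
      rw [get_path_sum]
      simp only [hpos]
      simp only [if_true]
      ring
    case _ p h =>
      have hmem := mem_pvCandB (PySem.List.max?_mem h)
      omega
  | succ n ih =>
    intro total r c hb
    rw [pvLoopB]
    split
    case _ h =>
      have hpos : pvNeighboursA r c (matrix.length : Int) ((PySem.List.pyGetD matrix 0 []).length : Int) = [] := by
        rw [← pvCandB_eq_pvNeighboursA]
        exact (PySem.List.max?_eq_none_iff _ _).mp h
      rw [get_path_sum]
      simp only [hpos]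
      simp only [if_true]
      ring
    case _ p h =>
      have hmem := mem_pvCandB (PySem.List.max?_mem h)
      have h' : PySem.List.max? (pvNeighboursA r c (matrix.length : Int) ((PySem.List.pyGetD matrix 0 []).length : Int))
          (fun q => pvAtA matrix q.1 q.2) = some p := by
        rw [← pvCandB_eq_pvNeighboursA]
        exact h
      have hne : pvNeighboursA r c (matrix.length : Int) ((PySem.List.pyGetD matrix 0 []).length : Int) ≠ [] := by
        intro he
        rw [(PySem.List.max?_eq_none_iff _ _).mpr he] at h'
        simp at h'
      have hsel := select_eq (fun q => pvAtA matrix q.1 q.2) _ p h'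
      have hrec := ih (total + pvValB matrix p.1 p.2) p.1 p.2 (by omega)
      rw [hrec]
      conv_rhs => rw [get_path_sum]
      rw [if_neg hne]
      simp only [pvValB_eq_pvAtA]
      split
      case _ h2 =>
        rw [hsel] at h2
        simp at h2
      case _ q h2 =>
        rw [hsel] at h2
        cases Option.some.inj h2
        ring

-- ===== VERDICT (by name: the statement is the Claim_ definition above) =====
theorem get_path_sum_spec : Claim_equal_get_path_sum := by
  intro matrix r c _ _
  unfold Spec_get_path_sum get_path_sum_alt
  rw [loop_eq matrix _ (pvValB matrix r c) r c (le_refl _), pvValB_eq_pvAtA]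
  ring
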